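-- pv_equiv track=rewrite | github.com/dudecon/python | BaseConverter.py | compute_glyphs
-- ===== SOURCE A (Python) =====
-- def compute_glyphs(BASE):
--     GLYPHS = []
--     BASE = min(BASE,1234)
--     offset = 55
--     for i in range(BASE):
--         if i < 10:
--             GLYPHS.append(str(i))
--             continue
--         if i == 36: offset += 101
--         elif i+offset == 888: offset += 2
--         elif i+offset == 896: offset += 5
--         elif i+offset == 907: offset += 4
--         elif i+offset == 930: offset += 2
--         elif i+offset == 1328: offset += 2
--         elif i+offset == 1367: offset += 11
--         GLYPHS.append(chr(i+offset))
--     return GLYPHS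
-- ===== SOURCE B (Python) =====
-- _RANGES = [(48, 10), (65, 26), (192, 696), (890, 6), (901, 6),
--            (911, 19), (932, 396), (1330, 37), (1378, 38)]
--
-- def compute_glyphs(BASE):
--     n = min(BASE, 1234)
--     out = []
--     for start, count in _RANGES:
--         if len(out) >= n:
--             break
--         take = min(count, n - len(out))
--         out.extend(chr(start + k) for k in range(take))
--     return out
-- ===== Notes on version B (the rewrite author's own statement) =====
-- stated objective: simpler
-- what changed: Replaced A's per-character loop with a running offset and a seven-branch elif cascade by a precomputed table of nine (start,count) codepoint ranges that is emitted in one flat pass until the capped base is reached.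
import Mathlib
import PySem

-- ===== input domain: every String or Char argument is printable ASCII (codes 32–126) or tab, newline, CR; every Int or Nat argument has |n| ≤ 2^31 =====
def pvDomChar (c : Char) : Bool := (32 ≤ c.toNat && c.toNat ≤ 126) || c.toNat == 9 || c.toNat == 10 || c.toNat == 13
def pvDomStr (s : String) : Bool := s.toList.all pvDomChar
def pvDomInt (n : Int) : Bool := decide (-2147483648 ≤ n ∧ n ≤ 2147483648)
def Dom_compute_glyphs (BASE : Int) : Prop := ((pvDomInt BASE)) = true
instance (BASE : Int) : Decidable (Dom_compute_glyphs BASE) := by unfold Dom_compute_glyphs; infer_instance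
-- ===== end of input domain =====

-- B replaces A's running-offset elif cascade by a precomputed table of codepoint ranges emitted in a flat pass (objective: simpler).

-- ===== PORT A =====
-- A's elif cascade: the offset after processing loop index i (reached only when i >= 10)
def aOff (i off : Int) : Int :=
  if i = 36 then off + 101
  else if i + off = 888 then off + 2
  else if i + off = 896 then off + 5
  else if i + off = 907 then off + 4
  else if i + off = 930 then off + 2
  else if i + off = 1328 then off + 2
  else if i + off = 1367 then off + 11
  else off

-- A's loop body: state = (GLYPHS, offset), i the loop variable
def aStep : (List String × Int) → Int → (List String × Int) :=
  fun s i =>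
    if i < 10 then (s.1 ++ [PySem.Int.toStr i], s.2)
    else (s.1 ++ [String.mk [Char.ofNat (i + aOff i s.2).toNat]], aOff i s.2)

def compute_glyphs (BASE : Int) : List String :=
  ((PySem.List.pyRange 0 (min BASE 1234) 1).foldl aStep ([], 55)).1

-- ===== PORT B =====
def glyphRangesB : List (Int × Int) :=
  [(48, 10), (65, 26), (192, 696), (890, 6), (901, 6), (911, 19), (932, 396), (1330, 37), (1378, 38)]

-- fold over the range table; 'if full then out' is B's break, min sc.2 (n - len) is B's 'take'
def compute_glyphs_alt (BASE : Int) : List String :=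
  let n := min BASE 1234
  glyphRangesB.foldl
    (fun out sc =>
      if (out.length : Int) ≥ n then out
      else out ++ (PySem.List.pyRange 0 (min sc.2 (n - (out.length : Int))) 1).map
        (fun k => String.mk [Char.ofNat (sc.1 + k).toNat]))
    []

-- ===== PRECONDITION & SPEC =====
def Spec_compute_glyphs (BASE : Int) (out : List String) : Prop := out = compute_glyphs_alt BASE
instance (BASE : Int) (out : List String) : Decidable (Spec_compute_glyphs BASE out) := by unfold Spec_compute_glyphs; infer_instance

-- ===== CLAIM (what is proved, stated in full; the proofs are below) =====
def Claim_equal_compute_glyphs : Prop := ∀ (BASE : Int), Dom_compute_glyphs BASE → Spec_compute_glyphs BASE (compute_glyphs BASE)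

-- ===== LEMMAS AND PROOFS =====

-- offF n = A's offset after n loop iterations
def offF (n : Nat) : Int :=
  if n ≤ 36 then 55 else if n ≤ 732 then 156 else if n ≤ 738 then 158
  else if n ≤ 744 then 163 else if n ≤ 763 then 167 else if n ≤ 1159 then 169
  else if n ≤ 1196 then 171 else 182

-- the glyph A appends at iteration i
def glyph (i : Nat) : String :=
  if i < 10 then PySem.Int.toStr (i : Int)
  else String.mk [Char.ofNat ((i : Int) + offF (i + 1)).toNat]

def full : List String := (List.range 1234).map glyph

def gchar (s : Int) (k : Nat) : String := String.mk [Char.ofNat (s + (k : Int)).toNat]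

def expandR (rs : List (Int × Int)) : List String :=
  rs.flatMap (fun sc => (List.range sc.2.toNat).map (gchar sc.1))

lemma offF_1 (n : Nat) (h : n ≤ 36) : offF n = 55 := by unfold offF; split_ifs <;> omega
lemma offF_2 (n : Nat) (h1 : 37 ≤ n) (h2 : n ≤ 732) : offF n = 156 := by unfold offF; split_ifs <;> omega
lemma offF_3 (n : Nat) (h1 : 733 ≤ n) (h2 : n ≤ 738) : offF n = 158 := by unfold offF; split_ifs <;> omega
lemma offF_4 (n : Nat) (h1 : 739 ≤ n) (h2 : n ≤ 744) : offF n = 163 := by unfold offF; split_ifs <;> omega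
lemma offF_5 (n : Nat) (h1 : 745 ≤ n) (h2 : n ≤ 763) : offF n = 167 := by unfold offF; split_ifs <;> omega
lemma offF_6 (n : Nat) (h1 : 764 ≤ n) (h2 : n ≤ 1159) : offF n = 169 := by unfold offF; split_ifs <;> omega
lemma offF_7 (n : Nat) (h1 : 1160 ≤ n) (h2 : n ≤ 1196) : offF n = 171 := by unfold offF; split_ifs <;> omega
lemma offF_8 (n : Nat) (h1 : 1197 ≤ n) : offF n = 182 := by unfold offF; split_ifs <;> omega

lemma aOff_offF (n : Nat) (h10 : 10 ≤ n) (h : n ≤ 1233) :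
    aOff (n : Int) (offF n) = offF (n + 1) := by
  have hcase : (10 ≤ n ∧ n ≤ 35) ∨ n = 36 ∨ (37 ≤ n ∧ n ≤ 731) ∨ n = 732 ∨
      (733 ≤ n ∧ n ≤ 737) ∨ n = 738 ∨ (739 ≤ n ∧ n ≤ 743) ∨ n = 744 ∨
      (745 ≤ n ∧ n ≤ 762) ∨ n = 763 ∨ (764 ≤ n ∧ n ≤ 1158) ∨ n = 1159 ∨
      (1160 ≤ n ∧ n ≤ 1195) ∨ n = 1196 ∨ (1197 ≤ n ∧ n ≤ 1233) := by omega
  rcases hcase with ⟨hl, hu⟩ | rfl | ⟨hl, hu⟩ | rfl | ⟨hl, hu⟩ | rfl | ⟨hl, hu⟩ | rfl |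
    ⟨hl, hu⟩ | rfl | ⟨hl, hu⟩ | rfl | ⟨hl, hu⟩ | rfl | ⟨hl, hu⟩
  · rw [offF_1 n (by omega), offF_1 (n + 1) (by omega)]; unfold aOff; split_ifs <;> omega
  · decide
  · rw [offF_2 n (by omega) (by omega), offF_2 (n + 1) (by omega) (by omega)]
    unfold aOff; split_ifs <;> omega
  · decide
  · rw [offF_3 n (by omega) (by omega), offF_3 (n + 1) (by omega) (by omega)]
    unfold aOff; split_ifs <;> omega
  · decide
  · rw [offF_4 n (by omega) (by omega), offF_4 (n + 1) (by omega) (by omega)]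
    unfold aOff; split_ifs <;> omega
  · decide
  · rw [offF_5 n (by omega) (by omega), offF_5 (n + 1) (by omega) (by omega)]
    unfold aOff; split_ifs <;> omega
  · decide
  · rw [offF_6 n (by omega) (by omega), offF_6 (n + 1) (by omega) (by omega)]
    unfold aOff; split_ifs <;> omega
  · decide
  · rw [offF_7 n (by omega) (by omega), offF_7 (n + 1) (by omega) (by omega)]
    unfold aOff; split_ifs <;> omega
  · decide
  · rw [offF_8 n (by omega), offF_8 (n + 1) (by omega)]; unfold aOff; split_ifs <;> omega

lemma aStep_eq (L : List String) (n : Nat) (h : n ≤ 1233) :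
    aStep (L, offF n) (n : Int) = (L ++ [glyph n], offF (n + 1)) := by
  by_cases h10 : n < 10
  · have h1 : ((n : Int)) < 10 := by omega
    simp only [aStep, glyph]
    rw [if_pos h1, if_pos h10, offF_1 n (by omega), offF_1 (n + 1) (by omega)]
  · have h1 : ¬ ((n : Int) < 10) := by omega
    have h2 := aOff_offF n (by omega) h
    simp only [aStep, glyph]
    rw [if_neg h1, if_neg h10, h2]

lemma aState_eq (n : Nat) (h : n ≤ 1234) :
    (PySem.List.pyRange 0 (n : Int) 1).foldl aStep ([], 55) = ((List.range n).map glyph, offF n) := by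
  induction n with
  | zero => simp [PySem.List.pyRange_one_eq_nil, offF]
  | succ m ih =>
    have h1 : (0 : Int) ≤ (m : Int) := by positivity
    rw [show ((m + 1 : Nat) : Int) = (m : Int) + 1 by push_cast; ring,
      PySem.List.pyRange_one_succ_right h1, List.foldl_append, ih (by omega)]
    simp only [List.foldl_cons, List.foldl_nil]
    rw [aStep_eq _ m (by omega), List.range_succ, List.map_append]
    rfl

lemma bFold_eq (n : Int) (rs : List (Int × Int)) (hc : ∀ sc ∈ rs, 0 ≤ sc.2) (out : List String) :
    rs.foldl
      (fun out sc =>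
        if (out.length : Int) ≥ n then out
        else out ++ (PySem.List.pyRange 0 (min sc.2 (n - (out.length : Int))) 1).map
          (fun k => String.mk [Char.ofNat (sc.1 + k).toNat]))
      out
    = out ++ (expandR rs).take (n - (out.length : Int)).toNat := by
  induction rs generalizing out with
  | nil => simp [expandR]
  | cons sc rs ih =>
    have hsc : (0 : Int) ≤ sc.2 := hc sc (by simp)
    have hrs : ∀ p ∈ rs, (0 : Int) ≤ p.2 := fun p hp => hc p (by simp [hp])
    simp only [List.foldl_cons]
    by_cases hfull : (out.length : Int) ≥ n
    · rw [if_pos hfull, ih hrs out]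
      have h0 : (n - (out.length : Int)).toNat = 0 := by omega
      simp [h0]
    · rw [if_neg hfull]
      have hchunk : (PySem.List.pyRange 0 (min sc.2 (n - (out.length : Int))) 1).map
            (fun k => String.mk [Char.ofNat (sc.1 + k).toNat])
          = (List.range (min sc.2 (n - (out.length : Int))).toNat).map (gchar sc.1) := by
        rw [PySem.List.pyRange_one, List.map_map]
        simp [gchar, Function.comp]
      rw [hchunk, ih hrs]
      simp only [expandR, List.flatMap_cons]
      rw [List.take_append, List.append_assoc]
      congr 1
      congr 1
      · rw [← List.map_take, List.take_range]
        congr 1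
        congr 1
        omega
      · congr 1
        simp only [List.length_append, List.length_map, List.length_range]
        omega

set_option maxRecDepth 100000 in
set_option maxHeartbeats 4000000 in
lemma expand_eq_full : expandR glyphRangesB = full := by decide

lemma compute_glyphs_eq_take (BASE : Int) :
    compute_glyphs BASE = full.take (min BASE 1234).toNat := by
  unfold compute_glyphs
  by_cases h0 : 0 ≤ min BASE 1234
  · obtain ⟨k, hk⟩ : ∃ k : Nat, min BASE 1234 = (k : Int) := ⟨(min BASE 1234).toNat, by omega⟩
    have hk2 : k ≤ 1234 := by omega
    rw [hk, aState_eq k hk2]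
    rw [full, ← List.map_take, List.take_range]
    simp only [Int.toNat_natCast]
    congr 2
    omega
  · rw [PySem.List.pyRange_one_eq_nil (by omega)]
    have h1 : (min BASE 1234).toNat = 0 := by omega
    simp [h1]

lemma compute_glyphs_alt_eq_take (BASE : Int) :
    compute_glyphs_alt BASE = full.take (min BASE 1234).toNat := by
  unfold compute_glyphs_alt
  rw [bFold_eq (min BASE 1234) glyphRangesB (by decide) []]
  rw [expand_eq_full]
  simp

-- ===== VERDICT (by name: the statement is the Claim_ definition above) =====
theorem compute_glyphs_spec : Claim_equal_compute_glyphs := by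
  intro BASE _
  unfold Spec_compute_glyphs
  rw [compute_glyphs_eq_take, compute_glyphs_alt_eq_take]
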